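-- pv_equiv track=rewrite | github.com/patrezelopes/python-exemples | amplify.py | dict_entryes
-- ===== SOURCE A (Python) =====
-- def dict_entryes(list_dict: list):
--     out_dict = dict()
--     for item in list_dict:
--         for key in item:
--             if out_dict.get(key):
--                 out_dict[key].append(item.get(key))
--             else:
--                 out_dict[key] = [item.get(key)]
--     return out_dict
-- ===== SOURCE B (Python) =====
-- def dict_entryes(list_dict: list):
--     keys = []
--     seen = set()
--     for item in list_dict:
--         for key in item:
--             if key not in seen:
--                 seen.add(key)
--                 keys.append(key)
--     return {key: [item[key] for item in list_dict if key in item] for key in keys}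
-- ===== Notes on version B (the rewrite author's own statement) =====
-- stated objective: alternative
-- what changed: A builds the result in one fused pass, branching on whether each key already has an entry and appending; B transposes this into two passes: it first collects the distinct keys in first-appearance order, then builds each key's value list with a comprehension over the items containing it (trading an extra scan of the items per distinct key).
import Mathlib
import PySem

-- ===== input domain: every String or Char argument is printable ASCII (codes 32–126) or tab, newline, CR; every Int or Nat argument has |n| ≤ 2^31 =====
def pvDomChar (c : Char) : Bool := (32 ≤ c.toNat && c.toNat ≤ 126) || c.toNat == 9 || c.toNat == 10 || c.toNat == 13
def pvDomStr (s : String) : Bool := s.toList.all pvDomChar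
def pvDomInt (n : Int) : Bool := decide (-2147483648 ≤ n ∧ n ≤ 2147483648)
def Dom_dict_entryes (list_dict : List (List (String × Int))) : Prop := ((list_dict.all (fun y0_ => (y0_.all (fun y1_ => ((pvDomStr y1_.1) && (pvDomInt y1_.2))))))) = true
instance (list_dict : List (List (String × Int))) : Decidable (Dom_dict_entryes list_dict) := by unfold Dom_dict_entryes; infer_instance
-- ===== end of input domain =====

-- B transposes A's single fused accumulation into a collect-keys-then-group-per-key two-pass shape; same result, at the cost of an extra scan of the items per distinct key.

-- ===== PORT A =====
-- each Python item is a dict: PySem.Dict.ofList collapses duplicate keys exactly as dict() does;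
-- iterating its .items is Python's 'for key in item' paired with 'item.get(key)'.
-- 'if out_dict.get(key):' is a truthiness test: none and [] are falsy, so it is 'getD key [] ≠ []'.
def dict_entryes (list_dict : List (List (String × Int))) : List (String × List Int) :=
  (list_dict.foldl (fun out item =>
      (PySem.Dict.ofList item).items.foldl (fun out kv =>
        if (out.getD kv.1 []) ≠ [] then out.modify kv.1 [] (fun vs => vs ++ [kv.2])
        else out.insert kv.1 [kv.2]) out)
    PySem.Dict.empty).items

-- ===== PORT B =====
-- pass 1: distinct keys in first-appearance order (the seen-set + keys-list loop = PySem.Set.update);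
-- pass 2: per key, the values of every item containing it ('if key in item' + 'item[key]' = filterMap get?).
def dict_entryes_alt (list_dict : List (List (String × Int))) : List (String × List Int) :=
  let keys := list_dict.foldl (fun ks item => PySem.Set.update ks (PySem.Dict.ofList item).keys) ([] : PySem.Set String)
  keys.map (fun k => (k, list_dict.filterMap (fun item => (PySem.Dict.ofList item).get? k)))

-- ===== PRECONDITION & SPEC =====
def Spec_dict_entryes (list_dict : List (List (String × Int))) (out : List (String × List Int)) : Prop := out = dict_entryes_alt list_dict
instance (list_dict : List (List (String × Int))) (out : List (String × List Int)) : Decidable (Spec_dict_entryes list_dict out) := by unfold Spec_dict_entryes; infer_instance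

-- ===== CLAIM (what is proved, stated in full; the proofs are below) =====
def Claim_equal_dict_entryes : Prop := ∀ (list_dict : List (List (String × Int))), Dom_dict_entryes list_dict → Spec_dict_entryes list_dict (dict_entryes list_dict)

-- ===== LEMMAS AND PROOFS =====

-- the flattened (key, value) stream A processes
def pvPairs (list_dict : List (List (String × Int))) : List (String × Int) :=
  list_dict.flatMap (fun item => (PySem.Dict.ofList item).items)

lemma foldl_flatMap_eq {α β γ : Type} (f : α → List β) (g : γ → β → γ) (l : List α) (init : γ) :
    (l.flatMap f).foldl g init = l.foldl (fun acc x => (f x).foldl g acc) init := by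
  induction l generalizing init with
  | nil => rfl
  | cons a l ih => simp [List.flatMap_cons, List.foldl_append, ih]

-- A's branchy step equals the unconditional modify-append step
lemma stepA_eq_stepM (out : PySem.Dict String (List Int)) (kv : String × Int) :
    (if (out.getD kv.1 []) ≠ [] then out.modify kv.1 [] (fun vs => vs ++ [kv.2])
     else out.insert kv.1 [kv.2]) = out.modify kv.1 [] (fun vs => vs ++ [kv.2]) := by
  split_ifs with h
  · rfl
  · simp only [ne_eq, not_not] at h
    simp [PySem.Dict.modify, h]

lemma dict_entryes_eq_pairs_fold (list_dict : List (List (String × Int))) :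
    dict_entryes list_dict =
      ((pvPairs list_dict).foldl (fun d p => d.modify p.1 [] (fun vs => vs ++ [p.2])) PySem.Dict.empty).items := by
  have hstep : (fun (out : PySem.Dict String (List Int)) (kv : String × Int) =>
      if (out.getD kv.1 []) ≠ [] then out.modify kv.1 [] (fun vs => vs ++ [kv.2])
      else out.insert kv.1 [kv.2])
      = fun out kv => out.modify kv.1 [] (fun vs => vs ++ [kv.2]) :=
    funext fun o => funext fun kv => stepA_eq_stepM o kv
  unfold dict_entryes pvPairs
  rw [hstep, foldl_flatMap_eq]

lemma keysB_eq (list_dict : List (List (String × Int))) (s : PySem.Set String) :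
    list_dict.foldl (fun ks item => PySem.Set.update ks (PySem.Dict.ofList item).keys) s =
      PySem.Set.update s ((pvPairs list_dict).map (fun p => p.1)) := by
  induction list_dict generalizing s with
  | nil => rfl
  | cons it l ih =>
      rw [List.foldl_cons, ih]
      simp [pvPairs, PySem.Set.update, PySem.Dict.keys, List.foldl_append]

-- an association list with unique keys: filtering by a key yields exactly the first-match lookup
lemma filter_nodup_eq_find? (ps : List (String × Int)) (h : (ps.map (fun p => p.1)).Nodup) (k : String) :
    (ps.filter (fun p => p.1 == k)).map (fun p => p.2)
      = ((ps.find? (fun p => p.1 == k)).map (fun p => p.2)).toList := by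
  induction ps with
  | nil => rfl
  | cons p ps ih =>
      simp only [List.map_cons, List.nodup_cons] at h
      by_cases hk : p.1 = k
      · have hfil : ps.filter (fun q => q.1 == k) = [] := by
          apply List.filter_eq_nil_iff.mpr
          intro q hq hq'
          exact h.1 (by rw [hk, ← show q.1 = k by simpa using hq']; exact List.mem_map_of_mem hq)
        simp [List.find?_cons, hk, hfil]
      · simp [List.find?_cons, hk, ih h.2]

lemma filter_items_eq_get? (d : PySem.Dict String Int) (h : d.keys.Nodup) (k : String) :
    ((d.items.filter (fun p => p.1 == k)).map (fun p => p.2)) = (d.get? k).toList := by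
  simp only [PySem.Dict.keys] at h
  simpa [PySem.Dict.get?] using filter_nodup_eq_find? d.items h k

lemma valsB_eq (list_dict : List (List (String × Int))) (k : String) :
    list_dict.filterMap (fun item => (PySem.Dict.ofList item).get? k) =
      ((pvPairs list_dict).filter (fun p => p.1 == k)).map (fun p => p.2) := by
  induction list_dict with
  | nil => rfl
  | cons it l ih =>
      have h1 := filter_items_eq_get? (PySem.Dict.ofList it) (PySem.Dict.nodup_keys_ofList it) k
      cases hg : (PySem.Dict.ofList it).get? k with
      | none =>
          rw [hg] at h1
          simp only [List.filterMap_cons, hg, pvPairs, List.flatMap_cons, List.filter_append,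
            List.map_append] at *
          rw [ih, h1]
          simp
      | some v =>
          rw [hg] at h1
          simp only [List.filterMap_cons, hg, pvPairs, List.flatMap_cons, List.filter_append,
            List.map_append] at *
          rw [ih, h1]
          simp

-- ===== VERDICT (by name: the statement is the Claim_ definition above) =====
theorem dict_entryes_spec : Claim_equal_dict_entryes := by
  intro list_dict _
  show dict_entryes list_dict = dict_entryes_alt list_dict
  rw [dict_entryes_eq_pairs_fold]
  have hnd : ((pvPairs list_dict).foldl (fun d p => d.modify p.1 [] (fun vs => vs ++ [p.2]))
      PySem.Dict.empty).keys.Nodup :=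
    PySem.Dict.nodup_keys_foldl_modify_key (pvPairs list_dict) (fun p => p.1) []
      (fun _ p vs => vs ++ [p.2]) PySem.Dict.empty (by simp [PySem.Dict.empty, PySem.Dict.keys])
  rw [PySem.Dict.items_eq_map_keys _ hnd []]
  rw [PySem.Dict.keys_foldl_modify_key (pvPairs list_dict) (fun p => p.1) []
      (fun _ p vs => vs ++ [p.2]) PySem.Dict.empty]
  unfold dict_entryes_alt
  rw [keysB_eq]
  have hek : (PySem.Dict.empty : PySem.Dict String (List Int)).keys = ([] : PySem.Set String) := rfl
  rw [hek]
  apply List.map_congr_left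
  intro k _
  refine Prod.ext rfl ?_
  simp only
  rw [PySem.Dict.getD_foldl_modify_append, valsB_eq]
  rfl
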